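-- pv_equiv track=rewrite | github.com/MotionEnterprise/backend | apps/whatsapp/constants.py | get_jewellery_type_by_option
-- ===== SOURCE A (Python) =====
-- JEWELLERY_TYPES = [
--     {
--         "id": "ring",
--         "label": "Ring",
--         "option": "A",
--         "category": "hand",
--         "human_part": "finger",
--     },
--     {
--         "id": "bangle",
--         "label": "Bangle",
--         "option": "B",
--         "category": "hand",
--         "human_part": "wrist",
--     },
--     {
--         "id": "necklace",
--         "label": "Necklace",
--         "option": "C",
--         "category": "neck",
--         "human_part": "neck",
--     },
--     {
--         "id": "earrings",
--         "label": "Earrings",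
--         "option": "D",
--         "category": "ear",
--         "human_part": "ear",
--     },
-- ]
--
-- def get_jewellery_type_by_option(option: str):
--     """
--     Get jewellery type by option letter (case-insensitive).
--
--     Args:
--         option: Single letter option (e.g., "A", "a", "ring")
--
--     Returns:
--         dict or None: Jewellery type document if found
--     """
--     option_upper = option.strip().upper()
--     option_lower = option.strip().lower()
--
--     # First try to match by option letter
--     for jt in JEWELLERY_TYPES:
--         if jt["option"].upper() == option_upper:
--             return jt
--
--     # If no match by option, try to match by id
--     for jt in JEWELLERY_TYPES:
--         if jt["id"].lower() == option_lower:
--             return jt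
--
--     return None
-- ===== SOURCE B (Python) =====
-- JEWELLERY_TYPES = [
--     {
--         "id": "ring",
--         "label": "Ring",
--         "option": "A",
--         "category": "hand",
--         "human_part": "finger",
--     },
--     {
--         "id": "bangle",
--         "label": "Bangle",
--         "option": "B",
--         "category": "hand",
--         "human_part": "wrist",
--     },
--     {
--         "id": "necklace",
--         "label": "Necklace",
--         "option": "C",
--         "category": "neck",
--         "human_part": "neck",
--     },
--     {
--         "id": "earrings",
--         "label": "Earrings",
--         "option": "D",
--         "category": "ear",
--         "human_part": "ear",
--     },
-- ]
--
--
-- def get_jewellery_type_by_option(option: str):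
--     # Single pass: an option-letter match wins immediately (it always outranks
--     # any id match); the FIRST id match is remembered as a fallback accumulator.
--     key = option.strip()
--     option_upper = key.upper()
--     option_lower = key.lower()
--     id_match = None
--     for jt in JEWELLERY_TYPES:
--         if jt["option"].upper() == option_upper:
--             return jt
--         if id_match is None and jt["id"].lower() == option_lower:
--             id_match = jt
--     return id_match
-- ===== Notes on version B (the rewrite author's own statement) =====
-- stated objective: alternative
-- what changed: Replaces A's two staged full scans (first all options, then all ids) with one single pass that early-returns on an option match and carries the first id match as a fallback accumulator.
import Mathlib
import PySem

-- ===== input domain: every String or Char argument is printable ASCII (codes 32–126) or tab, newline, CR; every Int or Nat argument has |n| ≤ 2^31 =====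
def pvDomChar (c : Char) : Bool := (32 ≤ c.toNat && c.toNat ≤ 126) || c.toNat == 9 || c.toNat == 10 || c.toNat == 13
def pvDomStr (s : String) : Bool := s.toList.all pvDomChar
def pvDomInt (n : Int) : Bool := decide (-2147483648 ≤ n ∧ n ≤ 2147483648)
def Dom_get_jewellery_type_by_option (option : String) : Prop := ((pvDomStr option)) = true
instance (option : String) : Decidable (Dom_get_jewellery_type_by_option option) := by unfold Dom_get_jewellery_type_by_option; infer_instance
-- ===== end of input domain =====

-- B replaces A's two staged full scans with one single pass that early-returns on an
-- option-letter match and carries the first id match as a fallback accumulator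
-- (objective: alternative decomposition, same observable results).

-- ===== PORT A =====
-- Each Python dict document is an association list in insertion order.
def pvJT : List (List (String × String)) :=
  [[("id","ring"),("label","Ring"),("option","A"),("category","hand"),("human_part","finger")],
   [("id","bangle"),("label","Bangle"),("option","B"),("category","hand"),("human_part","wrist")],
   [("id","necklace"),("label","Necklace"),("option","C"),("category","neck"),("human_part","neck")],
   [("id","earrings"),("label","Earrings"),("option","D"),("category","ear"),("human_part","ear")]]

-- jt["k"]: first-match lookup in the assoc list (all keys present in pvJT, so the default is never used)
def pvKey (jt : List (String × String)) (k : String) : String :=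
  ((PySem.Dict.mk jt).get? k).getD ""

-- first loop of A: match by option letter
def pvFindOption : List (List (String × String)) → String → Option (List (String × String))
  | [], _ => none
  | jt :: rest, u => if PySem.Str.upper (pvKey jt "option") == u then some jt else pvFindOption rest u

-- second loop of A: match by id
def pvFindId : List (List (String × String)) → String → Option (List (String × String))
  | [], _ => none
  | jt :: rest, l => if PySem.Str.lower (pvKey jt "id") == l then some jt else pvFindId rest l

def get_jewellery_type_by_option (option : String) : Option (List (String × String)) :=
  let option_upper := PySem.Str.upper (PySem.Str.strip option)
  let option_lower := PySem.Str.lower (PySem.Str.strip option)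
  match pvFindOption pvJT option_upper with
  | some jt => some jt
  | none =>
    match pvFindId pvJT option_lower with
    | some jt => some jt
    | none => none

-- ===== PORT B =====
-- the single for-loop of Source B: early return on option match, accumulator id_match
def pvScan : List (List (String × String)) → String → String →
    Option (List (String × String)) → Option (List (String × String))
  | [], _, _, id_match => id_match
  | jt :: rest, u, l, id_match =>
    if PySem.Str.upper (pvKey jt "option") == u then some jt
    else pvScan rest u l
      (if id_match.isNone && (PySem.Str.lower (pvKey jt "id") == l) then some jt else id_match)

def get_jewellery_type_by_option_alt (option : String) : Option (List (String × String)) :=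
  let key := PySem.Str.strip option
  let option_upper := PySem.Str.upper key
  let option_lower := PySem.Str.lower key
  pvScan pvJT option_upper option_lower none

-- ===== PRECONDITION & SPEC =====
def Spec_get_jewellery_type_by_option (option : String) (out : Option (List (String × String))) : Prop := out = get_jewellery_type_by_option_alt option
instance (option : String) (out : Option (List (String × String))) : Decidable (Spec_get_jewellery_type_by_option option out) := by unfold Spec_get_jewellery_type_by_option; infer_instance

-- ===== CLAIM (what is proved, stated in full; the proofs are below) =====
def Claim_equal_get_jewellery_type_by_option : Prop := ∀ (option : String), Dom_get_jewellery_type_by_option option → Spec_get_jewellery_type_by_option option (get_jewellery_type_by_option option)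

-- ===== LEMMAS AND PROOFS =====

-- Loop invariant: the single pass equals "option scan first, else the pending
-- accumulator, else the id scan" — on ANY list, by induction.
theorem pvScan_eq (xs : List (List (String × String))) (u l : String)
    (acc : Option (List (String × String))) :
    pvScan xs u l acc =
      match pvFindOption xs u with
      | some jt => some jt
      | none => match acc with
                | some a => some a
                | none => pvFindId xs l := by
  induction xs generalizing acc with
  | nil => cases acc <;> simp [pvScan, pvFindOption, pvFindId]
  | cons jt rest ih =>
    simp only [pvScan, pvFindOption, pvFindId]
    by_cases ho : (PySem.Str.upper (pvKey jt "option") == u) = true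
    · simp [ho]
    · simp only [ho, if_neg, Bool.not_eq_true] at *
      rw [ih]
      cases acc with
      | some a => simp
      | none =>
        by_cases hi : (PySem.Str.lower (pvKey jt "id") == l) = true <;> simp [hi]

-- ===== VERDICT (by name: the statement is the Claim_ definition above) =====
theorem get_jewellery_type_by_option_spec : Claim_equal_get_jewellery_type_by_option := by
  intro option _
  show get_jewellery_type_by_option option = get_jewellery_type_by_option_alt option
  simp only [get_jewellery_type_by_option, get_jewellery_type_by_option_alt]
  rw [pvScan_eq]
  rcases h : pvFindOption pvJT (PySem.Str.upper (PySem.Str.strip option)) with _ | jt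
  · rcases h2 : pvFindId pvJT (PySem.Str.lower (PySem.Str.strip option)) with _ | jt2 <;> simp
  · simp
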